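-- pv_equiv track=rewrite | github.com/Lem0npieee/GraphicsDrawingSystem | src/shapes/circle.py | _optimize_fill_rendering
-- ===== SOURCE A (Python) =====
-- from typing import Tuple, Dict, Any, List
--
-- def _optimize_fill_rendering(fill_points: List[Tuple[int, int]]) -> List[Tuple[int, int, int, int]]:
--     """
--     悄咪咪的优化函数：将像素点合并为矩形块以减少canvas调用
--     输入：[(x, y)] 像素点列表
--     输出：[(x1, y1, x2, y2)] 矩形块列表
--     """
--     if not fill_points:
--         return []
--
--     # 按行分组像素点
--     rows = {}
--     for x, y in fill_points:
--         if y not in rows: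
--             rows[y] = []
--         rows[y].append(x)
--
--     # 对每行的x坐标排序
--     for y in rows:
--         rows[y].sort()
--
--     rectangles = []
--
--     # 将连续的像素点合并为水平线段
--     for y in sorted(rows.keys()):
--         x_coords = rows[y]
--         if not x_coords:
--             continue
--
--         # 找连续的x坐标段
--         start_x = x_coords[0]
--         end_x = x_coords[0]
--
--         for i in range(1, len(x_coords)):
--             if x_coords[i] == end_x + 1:
--                 # 连续
--                 end_x = x_coords[i]
--             else:
--                 # 不连续，保存前一段
--                 rectangles.append((start_x, y, end_x, y))
--                 start_x = x_coords[i]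
--                 end_x = x_coords[i]
--
--         # 保存最后一段
--         rectangles.append((start_x, y, end_x, y))
--
--     return rectangles
-- ===== SOURCE B (Python) =====
-- from typing import Tuple, List
--
-- def _optimize_fill_rendering(fill_points: List[Tuple[int, int]]) -> List[Tuple[int, int, int, int]]:
--     """One pass over the points sorted by (row, column), keeping the current run."""
--     pts = sorted(fill_points, key=lambda p: (p[1], p[0]))
--     if not pts:
--         return []
--     (start_x, cur_y) = pts[0]
--     end_x = start_x
--     rects = []
--     for x, y in pts[1:]:
--         if y == cur_y and x == end_x + 1:
--             end_x = x
--         else: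
--             rects.append((start_x, cur_y, end_x, cur_y))
--             start_x, end_x, cur_y = x, x, y
--     rects.append((start_x, cur_y, end_x, cur_y))
--     return rects
-- ===== Notes on version B (the rewrite author's own statement) =====
-- stated objective: simpler
-- what changed: Replaces A's row->x-list dict, per-row sorts and nested rows*x loops by one global sort of the points by (y, x) followed by a single linear run-merging pass.
import Mathlib
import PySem

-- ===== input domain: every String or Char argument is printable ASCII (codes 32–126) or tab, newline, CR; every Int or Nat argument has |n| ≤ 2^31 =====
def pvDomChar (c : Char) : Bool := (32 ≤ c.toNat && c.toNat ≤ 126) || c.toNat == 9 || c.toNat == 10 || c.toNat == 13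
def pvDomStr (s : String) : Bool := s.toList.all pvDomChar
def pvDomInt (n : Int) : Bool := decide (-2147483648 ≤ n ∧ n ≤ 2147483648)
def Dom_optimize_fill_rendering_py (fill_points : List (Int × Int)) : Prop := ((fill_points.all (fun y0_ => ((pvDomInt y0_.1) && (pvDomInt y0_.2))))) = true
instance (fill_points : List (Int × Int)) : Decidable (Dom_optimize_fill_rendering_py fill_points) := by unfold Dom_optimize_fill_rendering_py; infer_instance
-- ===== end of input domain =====

-- B merges pixel points into horizontal runs in ONE pass over the list sorted by (row, column),
-- instead of A's row-grouping dict with per-row sorts and a nested row loop (objective: simpler).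

-- ===== PORT A =====
-- rows[y].append(x) step of A's grouping loop (if y not in rows: rows[y] = []; rows[y].append(x))
def aGroupStep (d : PySem.Dict Int (List Int)) (p : Int × Int) : PySem.Dict Int (List Int) :=
  let d' := if d.contains p.2 then d else d.insert p.2 []
  d'.insert p.2 (d'.getD p.2 [] ++ [p.1])

-- body of A's inner loop over x_coords[1:], state (rectangles, start_x, end_x)
def aRunStep (y : Int) (s : List (Int × Int × Int × Int) × Int × Int) (xi : Int) :
    List (Int × Int × Int × Int) × Int × Int :=
  if xi = s.2.2 + 1 then (s.1, s.2.1, xi)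
  else (s.1 ++ [(s.2.1, y, s.2.2, y)], xi, xi)

-- body of A's outer loop over sorted(rows.keys()); the [] case is the 'if not x_coords: continue'
def aRowBody (rows2 : PySem.Dict Int (List Int)) (rects : List (Int × Int × Int × Int)) (y : Int) :
    List (Int × Int × Int × Int) :=
  match rows2.getD y [] with
  | [] => rects
  | x0 :: rest =>
    let s := rest.foldl (aRunStep y) (rects, x0, x0)
    s.1 ++ [(s.2.1, y, s.2.2, y)]

def optimize_fill_rendering_py (fill_points : List (Int × Int)) : List (Int × Int × Int × Int) :=
  if fill_points = [] then []
  else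
    let rows : PySem.Dict Int (List Int) := fill_points.foldl aGroupStep PySem.Dict.empty
    -- for y in rows: rows[y].sort()
    let rows2 : PySem.Dict Int (List Int) :=
      rows.keys.foldl (fun d y => d.insert y (PySem.List.sorted (d.getD y []) (fun x => x))) rows
    (PySem.List.sorted rows2.keys (fun y => y)).foldl (aRowBody rows2) []

-- ===== PORT B =====
-- body of B's single loop, state (rects, start_x, end_x, cur_y)
def bStep (s : List (Int × Int × Int × Int) × Int × Int × Int) (p : Int × Int) :
    List (Int × Int × Int × Int) × Int × Int × Int :=
  if p.2 = s.2.2.2 ∧ p.1 = s.2.2.1 + 1 then (s.1, s.2.1, p.1, s.2.2.2)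
  else (s.1 ++ [(s.2.1, s.2.2.2, s.2.2.1, s.2.2.2)], p.1, p.1, p.2)

def optimize_fill_rendering_py_alt (fill_points : List (Int × Int)) : List (Int × Int × Int × Int) :=
  match PySem.List.sorted2 fill_points (fun p => p.2) (fun p => p.1) with
  | [] => []
  | p0 :: rest =>
    let s := rest.foldl bStep ([], p0.1, p0.1, p0.2)
    s.1 ++ [(s.2.1, s.2.2.2, s.2.2.1, s.2.2.2)]

-- ===== PRECONDITION & SPEC =====
def Spec_optimize_fill_rendering_py (fill_points : List (Int × Int)) (out : List (Int × Int × Int × Int)) : Prop := out = optimize_fill_rendering_py_alt fill_points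
instance (fill_points : List (Int × Int)) (out : List (Int × Int × Int × Int)) : Decidable (Spec_optimize_fill_rendering_py fill_points out) := by unfold Spec_optimize_fill_rendering_py; infer_instance

-- ===== CLAIM (what is proved, stated in full; the proofs are below) =====
def Claim_equal_optimize_fill_rendering_py : Prop := ∀ (fill_points : List (Int × Int)), Dom_optimize_fill_rendering_py fill_points → Spec_optimize_fill_rendering_py fill_points (optimize_fill_rendering_py fill_points)

-- ===== LEMMAS AND PROOFS =====

-- the run-merging recursion both loops implement: current run [s..e] on row cy, remaining points
def runs (s e cy : Int) : List (Int × Int) → List (Int × Int × Int × Int)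
  | [] => [(s, cy, e, cy)]
  | p :: l =>
    if p.2 = cy ∧ p.1 = e + 1 then runs s p.1 cy l
    else (s, cy, e, cy) :: runs p.1 p.1 p.2 l

def runsAll : List (Int × Int) → List (Int × Int × Int × Int)
  | [] => []
  | p :: l => runs p.1 p.1 p.2 l

def rowOf (fp : List (Int × Int)) (y : Int) : List Int :=
  PySem.List.sorted ((fp.filter (fun p => p.2 == y)).map (fun p => p.1)) (fun x => x)

def rowRuns (fp : List (Int × Int)) (y : Int) : List (Int × Int × Int × Int) :=
  match rowOf fp y with
  | [] => []
  | x0 :: rest => runs x0 x0 y (rest.map (fun x => (x, y)))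

def keysSorted (fp : List (Int × Int)) : List Int :=
  PySem.List.sorted (PySem.Set.ofList (fp.map (fun p => p.2))) (fun y => y)

def lexKey (p : Int × Int) : Lex (Int × Int) := toLex (p.2, p.1)

def blockOf (b : Int × List Int) : List (Int × Int) := b.2.map (fun x => (x, b.1))

-- B's fold computes `runs`
theorem bfold (l : List (Int × Int)) (rects : List (Int × Int × Int × Int)) (s e cy : Int) :
    (let st := l.foldl bStep (rects, s, e, cy);
     st.1 ++ [(st.2.1, st.2.2.2, st.2.2.1, st.2.2.2)]) = rects ++ runs s e cy l := by
  induction l generalizing rects s e cy with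
  | nil => simp [runs]
  | cons p l ih =>
    simp only [List.foldl_cons, runs]
    by_cases h : p.2 = cy ∧ p.1 = e + 1
    · rw [if_pos h]; simpa [bStep, h] using ih rects s p.1 cy
    · rw [if_neg h]
      have := ih (rects ++ [(s, cy, e, cy)]) p.1 p.1 p.2
      simp only [bStep, if_neg h] at *
      simpa using this

-- A's inner fold computes `runs` on the row's points
theorem afold (xs : List Int) (rects : List (Int × Int × Int × Int)) (s e y : Int) :
    (let st := xs.foldl (aRunStep y) (rects, s, e);
     st.1 ++ [(st.2.1, y, st.2.2, y)]) = rects ++ runs s e y (xs.map (fun x => (x, y))) := by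
  induction xs generalizing rects s e with
  | nil => simp [runs]
  | cons x xs ih =>
    simp only [List.foldl_cons, List.map_cons, runs]
    by_cases h : x = e + 1
    · rw [if_pos (by simp [h])]; simpa [aRunStep, h] using ih rects s x
    · rw [if_neg (by simpa using h)]
      have := ih (rects ++ [(s, y, e, y)]) x x
      simp only [aRunStep, if_neg h] at *
      simpa using this

-- a change of row closes the current run
theorem runs_break (l1 : List (Int × Int)) (cy : Int) (h1 : ∀ p ∈ l1, p.2 = cy)
    (rest : List (Int × Int)) (h2 : ∀ q ∈ rest.head?, q.2 ≠ cy) (s e : Int) :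
    runs s e cy (l1 ++ rest) = runs s e cy l1 ++ runsAll rest := by
  induction l1 generalizing s e with
  | nil =>
    cases rest with
    | nil => simp [runs, runsAll]
    | cons q l2 =>
      have hq : q.2 ≠ cy := h2 q (by simp)
      simp [runs, runsAll, hq]
  | cons p l1 ih =>
    have hp : p.2 = cy := h1 p (by simp)
    simp only [List.cons_append, runs]
    by_cases h : p.2 = cy ∧ p.1 = e + 1
    · rw [if_pos h, if_pos h]; exact ih (fun q hq => h1 q (by simp [hq])) s p.1
    · rw [if_neg h, if_neg h]
      simp only [List.cons_append, hp]
      rw [ih (fun q hq => h1 q (by simp [hq])) p.1 p.1]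







theorem runsAll_blocks (bs : List (Int × List Int)) (hne : ∀ b ∈ bs, b.2 ≠ [])
    (hp : bs.Pairwise (fun a b => a.1 < b.1)) :
    runsAll (bs.flatMap blockOf) =
      bs.flatMap (fun b =>
        match b.2 with
        | [] => []
        | x0 :: rest => runs x0 x0 b.1 (rest.map (fun x => (x, b.1)))) := by
  induction bs with
  | nil => simp [runsAll]
  | cons b bs ih =>
    obtain ⟨x0, rest, hb⟩ : ∃ x0 rest, b.2 = x0 :: rest := by
      cases hbb : b.2 with
      | nil => exact absurd hbb (hne b (by simp))
      | cons a l => exact ⟨a, l, rfl⟩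
    have hhead : ∀ q ∈ (bs.flatMap blockOf).head?, q.2 ≠ b.1 := by
      intro q hq
      have hq := List.mem_of_mem_head? hq
      obtain ⟨c, hc, hqc⟩ := List.mem_flatMap.mp hq
      obtain ⟨x, _, hx⟩ := List.mem_map.mp hqc
      have : b.1 < c.1 := (List.pairwise_cons.mp hp).1 c hc
      rw [← hx]
      exact fun hc => absurd hc (by simp; omega)
    simp only [List.flatMap_cons, hb, blockOf, List.map_cons, List.cons_append, runsAll]
    rw [runs_break (rest.map (fun x => (x, b.1))) b.1 (by simp) _ hhead x0 x0]
    rw [ih (fun c h => hne c (by simp [h])) (List.pairwise_cons.mp hp).2]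

theorem sorted2_lex (xs : List (Int × Int)) :
    PySem.List.sorted2 xs (fun p => p.2) (fun p => p.1) = PySem.List.sorted xs lexKey := by
  rw [PySem.List.sorted_eq_foldl_insertBy]
  simp only [PySem.List.sorted2]
  apply PySem.List.foldl_congr_mem
  intro acc x _
  have h : (fun (a b : Int × Int) => (decide (a.2 < b.2) || (!decide (b.2 < a.2) && decide (a.1 < b.1))))
      = fun a b => decide (lexKey a < lexKey b) := by
    funext a b
    by_cases h1 : a.2 < b.2 <;> by_cases h2 : b.2 < a.2 <;> by_cases h3 : a.1 < b.1 <;>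
      simp [lexKey, Prod.Lex.lt_iff, h1, h2, h3] <;> omega
  rw [h]
  simp

theorem B_eq (fp : List (Int × Int)) :
    optimize_fill_rendering_py_alt fp = runsAll (PySem.List.sorted fp lexKey) := by
  unfold optimize_fill_rendering_py_alt
  rw [sorted2_lex]
  cases h : PySem.List.sorted fp lexKey with
  | nil => simp [runsAll]
  | cons p0 rest =>
    simp only [runsAll]
    exact bfold rest [] p0.1 p0.1 p0.2


theorem aGroupStep_modify (d : PySem.Dict Int (List Int)) (p : Int × Int) :
    aGroupStep d p = d.modify p.2 [] (fun v => v ++ [p.1]) := by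
  unfold aGroupStep PySem.Dict.modify
  by_cases h : d.contains p.2 = true
  · simp [h]
  · have h : d.contains p.2 = false := by simpa using h
    simp only [h, if_false, Bool.false_eq_true]
    rw [PySem.Dict.getD_insert_self, PySem.Dict.insert_insert_self,
        PySem.Dict.getD_of_not_contains _ _ h]

theorem rows_eq (fp : List (Int × Int)) :
    fp.foldl aGroupStep PySem.Dict.empty
      = fp.foldl (fun d p => d.modify p.2 [] (fun v => v ++ [p.1])) PySem.Dict.empty :=
  PySem.List.foldl_congr_mem _ _ _ _ (fun d p _ => aGroupStep_modify d p)

theorem rows_getD (fp : List (Int × Int)) (c : Int) :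
    (fp.foldl aGroupStep PySem.Dict.empty).getD c []
      = (fp.filter (fun p => p.2 == c)).map (fun p => p.1) := by
  rw [rows_eq]
  have h := PySem.Dict.getD_foldl_modify_append (fp.map (fun p : Int × Int => (p.2, p.1)))
    (PySem.Dict.empty : PySem.Dict Int (List Int)) c
  rw [List.foldl_map] at h
  rw [h]
  simp [List.filter_map, Function.comp_def, List.map_map]

theorem rows_keys (fp : List (Int × Int)) :
    (fp.foldl aGroupStep PySem.Dict.empty).keys = PySem.Set.ofList (fp.map (fun p => p.2)) := by
  rw [rows_eq,
    PySem.Dict.keys_foldl_modify_key fp (fun p => p.2) [] (fun _ p => fun v => v ++ [p.1]) PySem.Dict.empty,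
    PySem.Dict.keys_empty, PySem.Set.ofList_eq_foldl]
  rfl

theorem rows_nodup (fp : List (Int × Int)) :
    (fp.foldl aGroupStep PySem.Dict.empty).keys.Nodup := by
  rw [rows_eq]
  exact PySem.Dict.nodup_keys_foldl_modify_key fp (fun p => p.2) [] _ _ PySem.Dict.nodup_keys_empty

theorem sortvals_getD (ks : List Int) : ∀ (d : PySem.Dict Int (List Int)), ks.Nodup → ∀ k,
    (ks.foldl (fun d y => d.insert y (PySem.List.sorted (d.getD y []) (fun x => x))) d).getD k []
      = if k ∈ ks then PySem.List.sorted (d.getD k []) (fun x => x) else d.getD k [] := by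
  induction ks with
  | nil => simp
  | cons y ks ih =>
    intro d hnd k
    have hy : y ∉ ks := (List.nodup_cons.mp hnd).1
    simp only [List.foldl_cons]
    rw [ih _ (List.nodup_cons.mp hnd).2 k, PySem.Dict.getD_insert]
    by_cases hk : k ∈ ks
    · have hky : k ≠ y := fun h => hy (h ▸ hk)
      simp [hk, hky]
    · by_cases hke : k = y
      · simp [hke]
      · simp [hk, hke]

theorem sortvals_keys (ks : List Int) : ∀ (d : PySem.Dict Int (List Int)), (∀ k ∈ ks, k ∈ d.keys) →
    (ks.foldl (fun d y => d.insert y (PySem.List.sorted (d.getD y []) (fun x => x))) d).keys = d.keys := by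
  induction ks with
  | nil => simp
  | cons y ks ih =>
    intro d hks
    simp only [List.foldl_cons]
    have hc : d.contains y = true := (PySem.Dict.contains_iff_mem_keys d y).mpr (hks y (by simp))
    have hk : (d.insert y (PySem.List.sorted (d.getD y []) (fun x => x))).keys = d.keys :=
      PySem.Dict.keys_insert_of_contains d _ hc
    rw [ih _ (fun k hkk => by rw [hk]; exact hks k (by simp [hkk])), hk]

theorem A_eq (fp : List (Int × Int)) :
    optimize_fill_rendering_py fp = (keysSorted fp).flatMap (rowRuns fp) := by
  unfold optimize_fill_rendering_py
  by_cases hfp : fp = []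
  · simp [hfp, keysSorted]
  · rw [if_neg hfp]
    show (PySem.List.sorted
        ((fp.foldl aGroupStep PySem.Dict.empty).keys.foldl
          (fun d y => d.insert y (PySem.List.sorted (d.getD y []) (fun x => x)))
          (fp.foldl aGroupStep PySem.Dict.empty)).keys (fun y => y)).foldl
        (aRowBody _) [] = _
    rw [sortvals_keys _ _ (fun k hk => hk)]
    have hsk : PySem.List.sorted (fp.foldl aGroupStep PySem.Dict.empty).keys (fun y => y) = keysSorted fp := by
      rw [rows_keys]; rfl
    rw [hsk]
    have hbody : ∀ (rects : List (Int × Int × Int × Int)), ∀ y ∈ keysSorted fp,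
        aRowBody ((fp.foldl aGroupStep PySem.Dict.empty).keys.foldl
          (fun d y => d.insert y (PySem.List.sorted (d.getD y []) (fun x => x)))
          (fp.foldl aGroupStep PySem.Dict.empty)) rects y = rects ++ rowRuns fp y := by
      intro rects y hy
      have hy : y ∈ (fp.foldl aGroupStep PySem.Dict.empty).keys := by
        rw [rows_keys]
        exact (PySem.List.mem_sorted _ _ _ _).mp hy
      unfold aRowBody rowRuns
      rw [sortvals_getD _ _ (rows_nodup fp) y, if_pos hy, rows_getD]
      cases h : rowOf fp y with
      | nil =>
        rw [show PySem.List.sorted (List.map (fun p => p.1) (List.filter (fun p => p.2 == y) fp)) (fun x => x) = rowOf fp y from rfl, h]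
        simp
      | cons x0 rest =>
        rw [show PySem.List.sorted (List.map (fun p => p.1) (List.filter (fun p => p.2 == y) fp)) (fun x => x) = rowOf fp y from rfl, h]
        exact afold rest rects x0 x0 y
    rw [PySem.List.foldl_congr_mem _ _ _ _ hbody,
        PySem.List.foldl_append_eq_flatMap]
    simp

theorem lexKey_inj : Function.Injective lexKey := by
  intro a b h
  simp only [lexKey, toLex_inj, Prod.mk.injEq] at h
  exact Prod.ext h.2 h.1

theorem keysSorted_pairwise (fp : List (Int × Int)) :
    (keysSorted fp).Pairwise (fun a b => a < b) :=
  PySem.List.sorted_ofList_pairwise_lt _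

theorem keysSorted_nodup (fp : List (Int × Int)) : (keysSorted fp).Nodup :=
  (keysSorted_pairwise fp).imp ne_of_lt

theorem sum_single (ks : List Int) (f : Int → Nat) (y0 : Int) : ks.Nodup →
    (∀ y ∈ ks, y ≠ y0 → f y = 0) → (ks.map f).sum = if y0 ∈ ks then f y0 else 0 := by
  induction ks with
  | nil => simp
  | cons y ks ih =>
    intro hnd h0
    simp only [List.map_cons, List.sum_cons]
    by_cases hy : y = y0
    · subst hy
      have hz : (ks.map f).sum = 0 := by
        apply List.sum_eq_zero
        intro x hx
        obtain ⟨z, hz, rfl⟩ := List.mem_map.mp hx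
        exact h0 z (by simp [hz]) (fun he => (List.nodup_cons.mp hnd).1 (he ▸ hz))
      rw [hz, if_pos (by simp)]
      omega
    · rw [h0 y (by simp) hy,
        ih (List.nodup_cons.mp hnd).2 (fun z hz h => h0 z (by simp [hz]) h)]
      have hy : ¬ y0 = y := fun h => hy h.symm
      simp [List.mem_cons, hy]

theorem blocks_count (fp : List (Int × Int)) (q : Int × Int) :
    List.count q (((keysSorted fp).map (fun y => (y, rowOf fp y))).flatMap blockOf)
      = List.count q fp := by
  obtain ⟨qx, qy⟩ := q
  rw [List.count_flatMap, List.map_map]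
  have hF0 : ∀ y, y ≠ qy →
      ((List.count (qx, qy) ∘ blockOf) ∘ fun y => (y, rowOf fp y)) y = 0 := by
    intro y hy
    simp only [Function.comp_apply, blockOf]
    rw [List.count_eq_zero]
    intro hmem
    obtain ⟨x, _, hx⟩ := List.mem_map.mp hmem
    exact hy (by simpa using congrArg Prod.snd hx)
  have hFq : ((List.count (qx, qy) ∘ blockOf) ∘ fun y => (y, rowOf fp y)) qy
      = List.count (qx, qy) fp := by
    simp only [Function.comp_apply, blockOf]
    rw [List.count_map_of_injective _ (fun x => (x, qy)) (fun a b h => by simpa using congrArg Prod.fst h) qx]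
    unfold rowOf
    rw [(PySem.List.sorted_perm _ _ _).count_eq]
    rw [List.count_eq_countP, List.countP_map, List.countP_filter, List.count_eq_countP]
    apply List.countP_congr
    intro p _
    simp [Prod.ext_iff, Function.comp]
  rw [sum_single _ _ qy (keysSorted_nodup fp) (fun y _ h => hF0 y h)]
  by_cases hq : qy ∈ keysSorted fp
  · rw [if_pos hq, hFq]
  · rw [if_neg hq]
    symm
    rw [List.count_eq_zero]
    intro hmem
    apply hq
    unfold keysSorted
    rw [PySem.List.mem_sorted]
    exact (PySem.Set.mem_ofList _ _).mpr (List.mem_map.mpr ⟨(qx, qy), hmem, rfl⟩)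

theorem pts_eq_blocks (fp : List (Int × Int)) :
    PySem.List.sorted fp lexKey =
      ((keysSorted fp).map (fun y => (y, rowOf fp y))).flatMap blockOf := by
  apply PySem.List.eq_of_perm_of_pairwise_le_of_injective lexKey lexKey_inj
  · exact (PySem.List.sorted_perm _ _ _).trans
      (List.perm_iff_count.mpr (fun a => (blocks_count fp a).symm))
  · exact PySem.List.sorted_pairwise _ _
  · rw [List.flatMap_def, List.map_map]
    rw [List.pairwise_flatten]
    constructor
    · intro l hl
      obtain ⟨y, _, rfl⟩ := List.mem_map.mp hl
      simp only [Function.comp_apply, blockOf]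
      rw [List.pairwise_map]
      apply ((PySem.List.sorted_pairwise _ _)).imp
      intro a b hab
      rw [Prod.Lex.le_iff]
      right
      exact ⟨rfl, hab⟩
    · rw [List.pairwise_map]
      apply (keysSorted_pairwise fp).imp
      intro a b hab p hp q hq
      simp only [Function.comp_apply, blockOf] at hp hq
      obtain ⟨x, _, rfl⟩ := List.mem_map.mp hp
      obtain ⟨x, _, rfl⟩ := List.mem_map.mp hq
      rw [Prod.Lex.le_iff]
      left
      exact hab

-- ===== VERDICT (by name: the statement is the Claim_ definition above) =====
theorem optimize_fill_rendering_py_spec : Claim_equal_optimize_fill_rendering_py := by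
  intro fp _
  unfold Spec_optimize_fill_rendering_py
  rw [A_eq, B_eq, pts_eq_blocks, runsAll_blocks]
  · rw [List.flatMap_map]
    rfl
  · intro b hb
    obtain ⟨y, hy, rfl⟩ := List.mem_map.mp hb
    show rowOf fp y ≠ []
    unfold rowOf
    rw [Ne, PySem.List.sorted_eq_nil_iff, List.map_eq_nil_iff, List.filter_eq_nil_iff]
    intro h
    have hy2 : y ∈ fp.map (fun p => p.2) :=
      (PySem.Set.mem_ofList _ _).mp ((PySem.List.mem_sorted _ _ _ _).mp hy)
    obtain ⟨p, hp, hpy⟩ := List.mem_map.mp hy2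
    exact h p hp (by simp [hpy])
  · rw [List.pairwise_map]
    exact keysSorted_pairwise fp
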